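-- pv_equiv track=rewrite | github.com/kdcube/kdcube-ai-app | app/ai-app/services/kdcube-ai-app/kdcube_ai_app/apps/chat/sdk/solutions/react/v2/session.py | _recent_turn_ids
-- ===== SOURCE A (Python) =====
-- from typing import Any, Dict, List, Optional, Tuple
--
-- def _extract_turn_id(block: Dict[str, Any]) -> str:
--     return str(block.get("turn_id") or block.get("turn") or "").strip()
--
-- def _recent_turn_ids(blocks: List[Dict[str, Any]], keep_recent_turns: int) -> set[str]:
--     if keep_recent_turns <= 0:
--         return set()
--     seen: List[str] = []
--     for blk in reversed(blocks):
--         tid = _extract_turn_id(blk)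
--         if not tid or tid in seen:
--             continue
--         seen.append(tid)
--         if len(seen) >= keep_recent_turns:
--             break
--     return set(seen)
-- ===== SOURCE B (Python) =====
-- from typing import Any, Dict, List
--
--
-- def _extract_turn_id(block: Dict[str, Any]) -> str:
--     return str(block.get("turn_id") or block.get("turn") or "").strip()
--
--
-- def _recent_turn_ids(blocks: List[Dict[str, Any]], keep_recent_turns: int) -> set[str]:
--     # Different algorithm: instead of scanning reversed(blocks) with a growing
--     # 'seen' list and an early break, make ONE forward pass that records the
--     # LAST index at which each non-empty turn id occurs, then rank the ids by
--     # that index (descending) and keep the top keep_recent_turns.  Correct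
--     # because "first k distinct ids when walking backwards" are exactly the k
--     # ids with the largest last-occurrence positions.
--     if keep_recent_turns <= 0:
--         return set()
--     last: Dict[str, int] = {}
--     for i, blk in enumerate(blocks):
--         tid = _extract_turn_id(blk)
--         if tid:
--             last[tid] = i
--     recent = sorted(last, key=lambda t: last[t], reverse=True)
--     return set(recent[:keep_recent_turns])
-- ===== Notes on version B (the rewrite author's own statement) =====
-- stated objective: alternative
-- what changed: Instead of scanning reversed(blocks) with a growing 'seen' list and an early break, B makes one forward pass recording each non-empty tid's last occurrence index in a dict, then sorts the dict keys by that index descending and truncates to keep_recent_turns.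
import Mathlib
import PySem

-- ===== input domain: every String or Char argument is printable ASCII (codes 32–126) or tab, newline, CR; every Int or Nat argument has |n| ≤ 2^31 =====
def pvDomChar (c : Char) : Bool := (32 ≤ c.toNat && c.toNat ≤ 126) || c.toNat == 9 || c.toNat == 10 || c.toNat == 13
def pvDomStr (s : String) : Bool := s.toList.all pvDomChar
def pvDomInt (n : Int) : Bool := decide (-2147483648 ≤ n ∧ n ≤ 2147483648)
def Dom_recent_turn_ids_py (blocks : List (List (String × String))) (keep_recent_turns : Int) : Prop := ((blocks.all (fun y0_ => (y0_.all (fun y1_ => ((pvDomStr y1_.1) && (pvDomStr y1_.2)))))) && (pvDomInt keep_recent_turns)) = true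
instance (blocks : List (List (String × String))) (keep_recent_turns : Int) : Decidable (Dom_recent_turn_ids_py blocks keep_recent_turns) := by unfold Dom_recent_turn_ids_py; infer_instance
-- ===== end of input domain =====

-- B replaces A's reverse scan with seen-list and early break by a forward last-occurrence
-- index (dict) followed by a sort descending on that index and a truncation (objective: alternative).


-- ===== PORT A =====
-- shared helper: str(block.get("turn_id") or block.get("turn") or "").strip()
-- ('or' falls through on a missing key or an empty string; values are strings, so str() is the identity)
-- block.get(key, default) on the association list: first match
def pvGet (blk : List (String × String)) (key : String) : String :=
  (Option.map Prod.snd (blk.find? (fun p => p.1 == key))).getD ""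

def pvExtractTid (blk : List (String × String)) : String :=
  let v1 := pvGet blk "turn_id"
  PySem.Str.strip (if v1 = "" then pvGet blk "turn" else v1)

-- the 'for blk in reversed(blocks)' loop with its early break
def pvLoopA (k : Int) : List (List (String × String)) → List String → List String
  | [], seen => seen
  | blk :: rest, seen =>
    let tid := pvExtractTid blk
    if tid = "" ∨ tid ∈ seen then pvLoopA k rest seen
    else
      let seen' := seen ++ [tid]
      if k ≤ (seen'.length : Int) then seen' else pvLoopA k rest seen'

def recent_turn_ids_py (blocks : List (List (String × String))) (keep_recent_turns : Int) : List String :=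
  if keep_recent_turns ≤ 0 then [] else pvLoopA keep_recent_turns blocks.reverse []

-- ===== PORT B =====
-- 'for i, blk in enumerate(blocks): tid = …; if tid: last[tid] = i'
def pvLastIdx (blocks : List (List (String × String))) : PySem.Dict String Int :=
  (PySem.List.enumerate blocks 0).foldl
    (fun d p =>
      let tid := pvExtractTid p.2
      if tid = "" then d else d.insert tid p.1)
    PySem.Dict.empty

-- 'sorted(last, key=lambda t: last[t], reverse=True)' then 'set(recent[:keep_recent_turns])'
def recent_turn_ids_py_alt (blocks : List (List (String × String))) (keep_recent_turns : Int) : List String :=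
  if keep_recent_turns ≤ 0 then [] else
    let last := pvLastIdx blocks
    let recent := PySem.List.sorted last.keys (fun t => last.getD t 0) true
    PySem.Set.ofList (PySem.List.slice recent none (some keep_recent_turns))

-- ===== PRECONDITION & SPEC =====
def Spec_recent_turn_ids_py (blocks : List (List (String × String))) (keep_recent_turns : Int) (out : List String) : Prop := out = recent_turn_ids_py_alt blocks keep_recent_turns
instance (blocks : List (List (String × String))) (keep_recent_turns : Int) (out : List String) : Decidable (Spec_recent_turn_ids_py blocks keep_recent_turns out) := by unfold Spec_recent_turn_ids_py; infer_instance

-- ===== CLAIM (what is proved, stated in full; the proofs are below) =====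
def Claim_equal_recent_turn_ids_py : Prop := ∀ (blocks : List (List (String × String))) (keep_recent_turns : Int), Dom_recent_turn_ids_py blocks keep_recent_turns → Spec_recent_turn_ids_py blocks keep_recent_turns (recent_turn_ids_py blocks keep_recent_turns)

-- ===== LEMMAS AND PROOFS =====

-- proof-only helper: the deduped, non-empty tids of bs not already in seen, in loop order
def pvDD (seen : List String) : List (List (String × String)) → List String
  | [] => []
  | blk :: rest =>
    let t := pvExtractTid blk
    if t = "" ∨ t ∈ seen then pvDD seen rest else t :: pvDD (seen ++ [t]) rest

theorem pvLoopA_eq_take (k : Int) (bs : List (List (String × String))) :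
    ∀ seen : List String, (seen.length : Int) < k →
      pvLoopA k bs seen = seen ++ (pvDD seen bs).take (k.toNat - seen.length) := by
  induction bs with
  | nil => intro seen _; simp [pvLoopA, pvDD]
  | cons blk rest ih =>
    intro seen hlt
    by_cases hskip : pvExtractTid blk = "" ∨ pvExtractTid blk ∈ seen
    · simp only [pvLoopA, pvDD, if_pos hskip]
      exact ih seen hlt
    · simp only [pvLoopA, pvDD, if_neg hskip]
      by_cases hbr : k ≤ ((seen ++ [pvExtractTid blk]).length : Int)
      · simp only [if_pos hbr]
        have : k.toNat - seen.length = 1 := by simp at hbr; omega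
        simp [this]
      · simp only [if_neg hbr]
        have hlt' : (((seen ++ [pvExtractTid blk]).length : Int)) < k := by
          simp at hbr ⊢; omega
        rw [ih _ hlt']
        have htake : (pvExtractTid blk :: pvDD (seen ++ [pvExtractTid blk]) rest).take (k.toNat - seen.length)
            = pvExtractTid blk :: (pvDD (seen ++ [pvExtractTid blk]) rest).take (k.toNat - seen.length - 1) := by
          obtain ⟨m, hm'⟩ : ∃ m, k.toNat - seen.length = m + 1 := ⟨k.toNat - seen.length - 1, by omega⟩
          simp [hm']
        rw [htake]
        have harith : k.toNat - (seen ++ [pvExtractTid blk]).length = k.toNat - seen.length - 1 := by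
          simp; omega
        rw [harith]
        simp

theorem pvDD_eq_foldl_add (bs : List (List (String × String))) :
    ∀ seen : List String,
      seen ++ pvDD seen bs
        = List.foldl PySem.Set.add seen ((bs.map pvExtractTid).filter (fun t => t ≠ "")) := by
  induction bs with
  | nil => intro seen; simp [pvDD]
  | cons blk rest ih =>
    intro seen
    by_cases he : pvExtractTid blk = ""
    · simp [pvDD, he, ih]
    · by_cases hmem : pvExtractTid blk ∈ seen
      · have : PySem.Set.add seen (pvExtractTid blk) = seen := by
          simp [PySem.Set.add, PySem.Set.contains, hmem]
        simp only [pvDD, List.map_cons, List.filter_cons]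
        simp [he, hmem, ih]
      · have hadd : PySem.Set.add seen (pvExtractTid blk) = seen ++ [pvExtractTid blk] := by
          simp [PySem.Set.add, PySem.Set.contains, hmem]
        simp only [pvDD, List.map_cons, List.filter_cons]
        rw [if_neg (by simp [he, hmem] : ¬(pvExtractTid blk = "" ∨ pvExtractTid blk ∈ seen))]
        rw [if_pos (by simp [he])]
        rw [List.foldl_cons, hadd]
        rw [show seen ++ pvExtractTid blk :: pvDD (seen ++ [pvExtractTid blk]) rest
              = (seen ++ [pvExtractTid blk]) ++ pvDD (seen ++ [pvExtractTid blk]) rest by simp]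
        exact ih _

-- ---- B-side proof helpers ----

-- the (tid, index) pairs the dict loop actually inserts, in order
def pvPairs (l : List (Int × List (String × String))) : List (String × Int) :=
  l.filterMap (fun p => if pvExtractTid p.2 = "" then none else some (pvExtractTid p.2, p.1))

-- last-match lookup in a pair list (what repeated dict insertion leaves behind)
def pvLook : List (String × Int) → String → Option Int
  | [], _ => none
  | q :: rest, t => (pvLook rest t).or (if t = q.1 then some q.2 else none)

theorem pvLastIdx_eq_foldl (l : List (Int × List (String × String))) (d : PySem.Dict String Int) :
    l.foldl (fun d p => let tid := pvExtractTid p.2; if tid = "" then d else d.insert tid p.1) d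
      = (pvPairs l).foldl (fun d q => d.insert q.1 q.2) d := by
  induction l generalizing d with
  | nil => rfl
  | cons p rest ih =>
    by_cases h : pvExtractTid p.2 = "" <;> simp [pvPairs, h, ih]

theorem pvLook_get? (ps : List (String × Int)) (d : PySem.Dict String Int) (t : String) :
    (ps.foldl (fun d q => d.insert q.1 q.2) d).get? t = (pvLook ps t).or (d.get? t) := by
  induction ps generalizing d with
  | nil => simp [pvLook]
  | cons q rest ih =>
    rw [List.foldl_cons, ih, pvLook, Option.or_assoc, PySem.Dict.get?_insert]
    by_cases h : t = q.1 <;> simp [h]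

theorem pvLook_mem (ps : List (String × Int)) (t : String) (v : Int)
    (h : pvLook ps t = some v) : (t, v) ∈ ps := by
  induction ps with
  | nil => simp [pvLook] at h
  | cons q rest ih =>
    rw [pvLook] at h
    cases hr : pvLook rest t with
    | some w => rw [hr] at h; simp at h; exact List.mem_cons_of_mem _ (ih (by rw [hr, h]))
    | none =>
      rw [hr] at h; simp at h
      have : (t, v) = q := by cases q; simp_all
      rw [this]
      exact List.mem_cons_self

theorem pvLook_eq_none_iff (ps : List (String × Int)) (t : String) :
    pvLook ps t = none ↔ t ∉ ps.map Prod.fst := by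
  induction ps with
  | nil => simp [pvLook]
  | cons q rest ih =>
    rw [pvLook]
    constructor
    · intro h hm
      rcases Option.or_eq_none_iff.mp h with ⟨h1, h2⟩
      simp at hm
      rcases hm with hm | hm
      · rw [if_pos hm] at h2; simp at h2
      · exact (ih.mp h1) (by simpa using hm)
    · intro hm
      simp at hm
      rw [ih.mpr (by simpa using hm.2), if_neg hm.1]
      rfl

-- the core order fact: with strictly increasing indices, the first-occurrences of the
-- REVERSED tid list are ordered by strictly decreasing last index
theorem pvPairwise (ps : List (String × Int))
    (h : (ps.map Prod.snd).Pairwise (· < ·)) :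
    (PySem.List.dedup ((ps.map Prod.fst).reverse)).Pairwise
      (fun a b => (pvLook ps b).getD 0 < (pvLook ps a).getD 0) := by
  induction ps with
  | nil => simp [PySem.List.dedup, PySem.Set.ofList]
  | cons q rest ih =>
    rw [List.map_cons] at h
    rw [List.pairwise_cons] at h
    obtain ⟨hhead, htail⟩ := h
    have IH := ih htail
    have hlookcons : ∀ a ∈ rest.map Prod.fst, pvLook (q :: rest) a = pvLook rest a := by
      intro a ha
      rw [pvLook]
      cases hr : pvLook rest a with
      | some w => rfl
      | none => exact absurd ha ((pvLook_eq_none_iff rest a).mp hr)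
    have hmemdedup : ∀ a, a ∈ PySem.List.dedup ((rest.map Prod.fst).reverse) → a ∈ rest.map Prod.fst := by
      intro a ha
      rw [PySem.List.mem_dedup] at ha
      simpa using ha
    rw [List.map_cons, List.reverse_cons, PySem.List.dedup_eq_ofList, PySem.Set.ofList_eq_foldl,
        List.foldl_append, List.foldl_cons, List.foldl_nil]
    rw [← PySem.Set.ofList_eq_foldl, ← PySem.List.dedup_eq_ofList]
    by_cases hc : q.1 ∈ (rest.map Prod.fst)
    · have : PySem.Set.add (PySem.List.dedup ((rest.map Prod.fst).reverse)) q.1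
          = PySem.List.dedup ((rest.map Prod.fst).reverse) := by
        simp [PySem.Set.add, PySem.Set.contains, hc]
      rw [this]
      exact IH.imp_of_mem (fun {a b} ha hb r => by
        rw [hlookcons a (hmemdedup a ha), hlookcons b (hmemdedup b hb)]; exact r)
    · have : PySem.Set.add (PySem.List.dedup ((rest.map Prod.fst).reverse)) q.1
          = PySem.List.dedup ((rest.map Prod.fst).reverse) ++ [q.1] := by
        simp [PySem.Set.add, PySem.Set.contains, hc]
      rw [this, List.pairwise_append]
      refine ⟨IH.imp_of_mem (fun {a b} ha hb r => by
        rw [hlookcons a (hmemdedup a ha), hlookcons b (hmemdedup b hb)]; exact r), by simp, ?_⟩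
      intro a ha b hb
      simp at hb; subst hb
      have haf := hmemdedup a ha
      have hq : pvLook (q :: rest) q.1 = some q.2 := by
        rw [pvLook, (pvLook_eq_none_iff rest q.1).mpr hc]
        simp
      cases hr : pvLook rest a with
      | none => exact absurd haf ((pvLook_eq_none_iff rest a).mp hr)
      | some v =>
        have hmem := pvLook_mem rest a v hr
        have hv : v ∈ rest.map Prod.snd := by
          exact List.mem_map.mpr ⟨(a, v), hmem, rfl⟩
        rw [hlookcons a haf, hr, hq]
        simpa using hhead v hv

theorem pvPairs_map_fst (l : List (Int × List (String × String))) :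
    (pvPairs l).map Prod.fst = ((l.map Prod.snd).map pvExtractTid).filter (fun t => t ≠ "") := by
  induction l with
  | nil => rfl
  | cons p rest ih =>
    by_cases h : pvExtractTid p.2 = "" <;>
      simp [pvPairs, h] at * <;> simpa [h] using ih

theorem pvPairs_snd_mem (l : List (Int × List (String × String))) (v : Int)
    (hv : v ∈ (pvPairs l).map Prod.snd) : ∃ p ∈ l, v = p.1 := by
  induction l with
  | nil => simp [pvPairs] at hv
  | cons p rest ih =>
    by_cases h : pvExtractTid p.2 = ""
    · rw [pvPairs, List.filterMap_cons, if_pos h] at hv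
      obtain ⟨r, hr, hr2⟩ := ih hv
      exact ⟨r, List.mem_cons_of_mem _ hr, hr2⟩
    · rw [pvPairs, List.filterMap_cons, if_neg h] at hv
      simp only [List.map_cons, List.mem_cons] at hv
      rcases hv with hv | hv
      · exact ⟨p, List.mem_cons_self, hv⟩
      · obtain ⟨r, hr, hr2⟩ := ih hv
        exact ⟨r, List.mem_cons_of_mem _ hr, hr2⟩

theorem pvPairs_snd_pairwise (l : List (Int × List (String × String)))
    (h : l.Pairwise (fun p q => p.1 < q.1)) :
    ((pvPairs l).map Prod.snd).Pairwise (· < ·) := by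
  induction l with
  | nil => simp [pvPairs]
  | cons p rest ih =>
    rw [List.pairwise_cons] at h
    obtain ⟨hhead, htail⟩ := h
    by_cases he : pvExtractTid p.2 = ""
    · rw [pvPairs, List.filterMap_cons, if_pos he]
      exact ih htail
    · rw [pvPairs, List.filterMap_cons, if_neg he, List.map_cons, List.pairwise_cons]
      refine ⟨?_, ih htail⟩
      intro v hv
      obtain ⟨r, hr, hr2⟩ := pvPairs_snd_mem rest v hv
      exact hr2 ▸ hhead r hr

-- ===== VERDICT (by name: the statement is the Claim_ definition above) =====
theorem recent_turn_ids_py_spec : Claim_equal_recent_turn_ids_py := by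
  unfold Claim_equal_recent_turn_ids_py
  intro blocks k _
  unfold Spec_recent_turn_ids_py recent_turn_ids_py recent_turn_ids_py_alt
  by_cases hk : k ≤ 0
  · simp [hk]
  · simp only [if_neg hk]
    set ps := pvPairs (PySem.List.enumerate blocks 0) with hps
    set tidsF := ((blocks.map pvExtractTid).filter (fun t => t ≠ "")) with htidsF
    set tidsRev := ((blocks.reverse.map pvExtractTid).filter (fun t => t ≠ "")) with htidsRev
    have hfr : tidsRev = tidsF.reverse := by
      rw [htidsRev, htidsF, ← List.filter_reverse, ← List.map_reverse]
    -- A's loop result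
    have hA : pvLoopA k blocks.reverse [] = (PySem.List.dedup tidsRev).take k.toNat := by
      rw [pvLoopA_eq_take k blocks.reverse [] (by simp; omega)]
      have h0 : pvDD [] blocks.reverse = PySem.List.dedup tidsRev := by
        have := pvDD_eq_foldl_add blocks.reverse []
        simp only [List.nil_append] at this
        rw [this, htidsRev, PySem.List.dedup_eq_ofList, PySem.Set.ofList_eq_foldl]
      simp [h0]
    -- the dict is the foldl of insertions over ps
    have hdict : pvLastIdx blocks = ps.foldl (fun d q => d.insert q.1 q.2) PySem.Dict.empty := by
      rw [pvLastIdx, pvLastIdx_eq_foldl]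
    -- its lookups are pvLook
    have hkey : ∀ t, (pvLastIdx blocks).getD t 0 = (pvLook ps t).getD 0 := by
      intro t
      rw [PySem.Dict.getD_eq_get?_getD, hdict, pvLook_get? ps PySem.Dict.empty t,
          PySem.Dict.get?_empty, Option.or_none]
    -- its keys are the forward dedup of the tids
    have hfst : ps.map Prod.fst = tidsF := by
      rw [hps, pvPairs_map_fst, PySem.List.map_snd_enumerate, htidsF]
    have hkeys : (pvLastIdx blocks).keys = PySem.List.dedup tidsF := by
      rw [hdict]
      have := PySem.Dict.keys_foldl_insert_key (ν := Int) ps Prod.fst (fun _ q => q.2) PySem.Dict.empty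
      simp only [PySem.Dict.keys] at this ⊢
      rw [show (fun (d : PySem.Dict String Int) (q : String × Int) => d.insert q.1 q.2)
            = (fun (d : PySem.Dict String Int) (q : String × Int) => d.insert q.1 ((fun _ q => q.2) d q)) from rfl,
          this]
      simp [PySem.Set.update_nil_left, PySem.List.dedup_eq_ofList, hfst, PySem.Dict.empty]
    -- the sorted list is exactly the reverse-order dedup
    have hsorted : PySem.List.sorted (pvLastIdx blocks).keys (fun t => (pvLastIdx blocks).getD t 0) true
        = PySem.List.dedup tidsRev := by
      apply PySem.List.sorted_rev_eq_of_perm_of_pairwise_gt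
      · rw [hkeys, hfr]
        rw [List.perm_ext_iff_of_nodup (PySem.List.nodup_dedup _) (PySem.List.nodup_dedup _)]
        intro a
        rw [PySem.List.mem_dedup, PySem.List.mem_dedup, List.mem_reverse]
      · have hp := pvPairwise ps (pvPairs_snd_pairwise _ (PySem.List.pairwise_lt_enumerate blocks 0))
        rw [hfst, ← hfr] at hp
        exact hp.imp_of_mem (fun {a b} _ _ r => by rw [hkey a, hkey b]; exact r)
    rw [hA, hsorted, PySem.List.slice_to _ (show (0:ℤ) ≤ k by omega)]
    have hnd : ((PySem.List.dedup tidsRev).take k.toNat).Nodup :=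
      (PySem.List.nodup_dedup tidsRev).sublist (List.take_sublist _ _)
    rw [PySem.Set.ofList_eq_self_of_nodup _ hnd]
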